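-- pv_equiv track=rewrite | github.com/James-Oswald/IEEE-Professional-Development-Night | 3-8-21/eqSides.py | eqSidesGood
-- ===== SOURCE A (Python) =====
-- def eqSidesGood(arr):
--     right = sum(arr)
--     left = 0
--     for index in range(0, len(arr)):
--         if left == right - arr[index]:
--             return index
--         right -= arr[index]
--         left += arr[index]
--     return -1
-- ===== SOURCE B (Python) =====
-- def eqSidesGood(arr):
--     for index in range(len(arr)):
--         if sum(arr[:index]) == sum(arr[index+1:]):
--             return index
--     return -1
-- ===== Notes on version B (the rewrite author's own statement) =====
-- stated objective: simpler
-- what changed: Replaces A's running left/right accumulators (maintained by add/subtract across the loop) with a direct recomputation of both side sums from slices at each index; no mutable state survives between iterations.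
import Mathlib
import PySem

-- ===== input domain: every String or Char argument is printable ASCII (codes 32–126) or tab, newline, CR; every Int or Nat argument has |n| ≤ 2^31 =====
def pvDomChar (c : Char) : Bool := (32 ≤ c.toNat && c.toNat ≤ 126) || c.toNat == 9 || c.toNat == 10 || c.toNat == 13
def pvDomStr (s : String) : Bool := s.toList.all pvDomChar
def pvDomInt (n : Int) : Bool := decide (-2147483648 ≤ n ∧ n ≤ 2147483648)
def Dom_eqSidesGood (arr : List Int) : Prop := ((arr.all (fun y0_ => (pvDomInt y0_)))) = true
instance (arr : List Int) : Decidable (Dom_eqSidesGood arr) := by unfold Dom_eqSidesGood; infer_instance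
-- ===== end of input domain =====

-- B recomputes both side sums from fresh slices at each index instead of A's running
-- add/subtract accumulators; objective: simpler (no state carried between iterations).

-- ===== PORT A =====
-- A's for-loop over range(0, len(arr)) with the running state (left, right), early return.
def eqSidesGoodLoop (arr : List Int) : List Int → Int → Int → Int
  | [], _, _ => -1
  | i :: rest, left, right =>
    let x := PySem.List.pyGetD arr i 0   -- arr[index]; index always in range here
    if left = right - x then i
    else eqSidesGoodLoop arr rest (left + x) (right - x)

def eqSidesGood (arr : List Int) : Int :=
  let right := arr.sum
  let left : Int := 0
  eqSidesGoodLoop arr (PySem.List.pyRange 0 arr.length 1) left right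

-- ===== PORT B =====
-- B's loop: at each index compare sum(arr[:index]) with sum(arr[index+1:]).
def eqSidesGoodAltLoop (arr : List Int) : List Int → Int
  | [] => -1
  | i :: rest =>
    if (PySem.List.slice arr none (some i)).sum
        = (PySem.List.slice arr (some (i + 1)) none).sum then i
    else eqSidesGoodAltLoop arr rest

def eqSidesGood_alt (arr : List Int) : Int :=
  eqSidesGoodAltLoop arr (PySem.List.pyRange 0 arr.length 1)

-- ===== PRECONDITION & SPEC =====
def Spec_eqSidesGood (arr : List Int) (out : Int) : Prop := out = eqSidesGood_alt arr
instance (arr : List Int) (out : Int) : Decidable (Spec_eqSidesGood arr out) := by unfold Spec_eqSidesGood; infer_instance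

-- ===== CLAIM (what is proved, stated in full; the proofs are below) =====
def Claim_equal_eqSidesGood : Prop := ∀ (arr : List Int), Dom_eqSidesGood arr → Spec_eqSidesGood arr (eqSidesGood arr)

-- ===== LEMMAS AND PROOFS =====
theorem eqSides_loop_eq (arr : List Int) (k : Nat) :
    eqSidesGoodLoop arr (PySem.List.pyRange k arr.length 1) (arr.take k).sum (arr.drop k).sum
      = eqSidesGoodAltLoop arr (PySem.List.pyRange k arr.length 1) := by
  by_cases hk : k < arr.length
  · rw [show ((k : Int)) = ((k : Nat) : Int) from rfl] at *
    rw [PySem.List.pyRange_one_cons (by exact_mod_cast hk)]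
    have hx : PySem.List.pyGetD arr (k : Int) 0 = arr[k] := by
      simp [PySem.List.pyGetD_natCast, List.getD_eq_getElem?_getD, List.getElem?_eq_getElem hk]
    have hdrop : arr.drop k = arr[k] :: arr.drop (k + 1) := by
      exact (List.drop_eq_getElem_cons hk)
    have hcondA : ((arr.take k).sum = (arr.drop k).sum - arr[k])
        ↔ ((arr.take k).sum = (arr.drop (k + 1)).sum) := by
      rw [hdrop, List.sum_cons]; constructor <;> intro h <;> omega
    have hsliceL : PySem.List.slice arr none (some (k : Int)) = arr.take k :=
      PySem.List.slice_to_natCast arr k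
    have hsliceR : PySem.List.slice arr (some ((k : Int) + 1)) none = arr.drop (k + 1) := by
      rw [show ((k : Int) + 1) = (((k + 1 : Nat)) : Int) by push_cast; ring]
      exact PySem.List.slice_from_natCast arr (k + 1)
    show eqSidesGoodLoop arr ((k : Int) :: _) _ _ = eqSidesGoodAltLoop arr ((k : Int) :: _)
    rw [eqSidesGoodLoop, eqSidesGoodAltLoop, hsliceL, hsliceR]
    simp only [hx]
    by_cases hc : (arr.take k).sum = (arr.drop k).sum - arr[k]
    · rw [if_pos hc, if_pos (hcondA.mp hc)]
    · rw [if_neg hc, if_neg (fun h => hc (hcondA.mpr h))]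
      have h1 : (arr.take k).sum + arr[k] = (arr.take (k + 1)).sum := by
        rw [List.sum_take_succ _ _ hk]
      have h2 : (arr.drop k).sum - arr[k] = (arr.drop (k + 1)).sum := by
        rw [hdrop, List.sum_cons]; ring
      rw [show ((k : Int) + 1) = (((k + 1 : Nat)) : Int) by push_cast; ring, h1, h2]
      exact eqSides_loop_eq arr (k + 1)
  · have : PySem.List.pyRange (k : Int) (arr.length : Int) 1 = [] := by
      simp [PySem.List.pyRange]; omega
    rw [this]; rfl
termination_by arr.length - k
decreasing_by omega

-- ===== VERDICT (by name: the statement is the Claim_ definition above) =====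
theorem eqSidesGood_spec : Claim_equal_eqSidesGood := by
  intro arr _
  show eqSidesGood arr = eqSidesGood_alt arr
  have h := eqSides_loop_eq arr 0
  simpa [eqSidesGood, eqSidesGood_alt] using h
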